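-- pv_equiv track=rewrite | github.com/stephenysh/translate-sunil | model/utils/evaluation_with_re.py | str_index_to_word_index
-- ===== SOURCE A (Python) =====
-- def str_index_to_word_index(strString):
--
--     str_w_dic = {}
--
--     wordN = 1
--
--     for i, s in enumerate(strString):
--         if s == ',':
--             wordN = wordN +1
--             continue
--         else:
--             str_w_dic[i] = wordN
--
--     return str_w_dic
-- ===== SOURCE B (Python) =====
-- def str_index_to_word_index(strString):
--     # split into comma-separated segments first, then walk segments with a position cursor
--     dic = {}
--     pos = 0
--     for wordNumber, seg in enumerate(strString.split(','), 1):
--         for _ in seg: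
--             dic[pos] = wordNumber
--             pos += 1
--         pos += 1
--     return dic
-- ===== Notes on version B (the rewrite author's own statement) =====
-- stated objective: alternative
-- what changed: B first splits the string into comma-separated segments and then walks the word segments with a nested loop and a running position cursor, instead of A's single flat pass over characters that counts separators as it goes.
import Mathlib
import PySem

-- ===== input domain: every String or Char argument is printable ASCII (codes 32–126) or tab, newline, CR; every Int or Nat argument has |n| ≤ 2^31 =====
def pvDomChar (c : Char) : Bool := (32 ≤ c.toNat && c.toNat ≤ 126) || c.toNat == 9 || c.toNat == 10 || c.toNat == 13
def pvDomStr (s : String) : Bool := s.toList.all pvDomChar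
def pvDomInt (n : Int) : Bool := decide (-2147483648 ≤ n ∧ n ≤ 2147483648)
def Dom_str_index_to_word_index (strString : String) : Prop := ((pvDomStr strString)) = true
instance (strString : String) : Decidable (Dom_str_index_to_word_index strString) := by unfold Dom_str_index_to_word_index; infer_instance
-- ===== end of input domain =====

-- B splits the string into comma-separated segments and walks them with a position cursor instead of A's flat
-- comma-counting pass; same return value, stated and proved below (objective: alternative).


-- ===== PORT A =====
-- flat pass over enumerate(strString): commas bump the word counter, other chars record index ↦ word number
def str_index_to_word_index (strString : String) : List (Int × Int) :=
  (((PySem.List.enumerate strString.toList 0).foldl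
      (fun (st : PySem.Dict Int Int × Int) p =>
        if p.2 = ',' then (st.1, st.2 + 1) else (st.1.insert p.1 st.2, st.2))
      (PySem.Dict.empty, 1)).1).items

-- ===== PORT B =====
-- inner loop of B: for _ in seg: dic[pos] = wordNumber; pos += 1
def pvSegLoop (n : Int) (seg : List Char) (st : PySem.Dict Int Int × Int) : PySem.Dict Int Int × Int :=
  seg.foldl (fun st _ => (st.1.insert st.2 n, st.2 + 1)) st

-- B: split on ',', then enumerate the segments from 1 with a running position cursor
def str_index_to_word_index_alt (strString : String) : List (Int × Int) :=
  (((PySem.List.enumerate (PySem.Chars.splitOn strString.toList [',']) 1).foldl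
      (fun (st : PySem.Dict Int Int × Int) p =>
        let st' := pvSegLoop p.1 p.2 st
        (st'.1, st'.2 + 1))
      (PySem.Dict.empty, 0)).1).items

-- ===== PRECONDITION & SPEC =====
def Spec_str_index_to_word_index (strString : String) (out : List (Int × Int)) : Prop := out = str_index_to_word_index_alt strString
instance (strString : String) (out : List (Int × Int)) : Decidable (Spec_str_index_to_word_index strString out) := by unfold Spec_str_index_to_word_index; infer_instance

-- ===== CLAIM (what is proved, stated in full; the proofs are below) =====
def Claim_equal_str_index_to_word_index : Prop := ∀ (strString : String), Dom_str_index_to_word_index strString → Spec_str_index_to_word_index strString (str_index_to_word_index strString)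

-- ===== LEMMAS AND PROOFS =====

-- the pairs A's loop emits, as a spec function
def pvPairs : List Char → Int → Int → List (Int × Int)
  | [], _, _ => []
  | c :: cs, i, n => if c = ',' then pvPairs cs (i + 1) (n + 1) else (i, n) :: pvPairs cs (i + 1) n

-- the pairs one segment of B emits
def pvSegPairs : List Char → Int → Int → List (Int × Int)
  | [], _, _ => []
  | _ :: cs, pos, n => (pos, n) :: pvSegPairs cs (pos + 1) n

-- the pairs B's outer loop emits
def pvSegsPairs : List (List Char) → Int → Int → List (Int × Int)
  | [], _, _ => []
  | seg :: rest, pos, n => pvSegPairs seg pos n ++ pvSegsPairs rest (pos + seg.length + 1) (n + 1)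

-- single-char-separator split, accumulator style (reference model of splitOn … [','])
def pvMySplit : List Char → List Char → List (List Char)
  | cur, [] => [cur.reverse]
  | cur, c :: cs => if c = ',' then cur.reverse :: pvMySplit [] cs else pvMySplit (c :: cur) cs

-- a fresh (maximal) key is not contained
lemma pvNotContains (d : PySem.Dict Int Int) (k : Int) (h : ∀ x ∈ d.keys, x < k) :
    d.contains k = false := by
  cases hc : d.contains k
  · rfl
  · exact absurd (h k ((PySem.Dict.contains_iff_mem_keys d k).mp hc)) (lt_irrefl k)

-- A's fold, characterized
lemma pvA_fold (cs : List Char) : ∀ (i n : Int) (d : PySem.Dict Int Int),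
    (∀ x ∈ d.keys, x < i) → d.keys.Nodup →
    (((PySem.List.enumerate cs i).foldl
        (fun (st : PySem.Dict Int Int × Int) p =>
          if p.2 = ',' then (st.1, st.2 + 1) else (st.1.insert p.1 st.2, st.2))
        (d, n)).1).items = d.items ++ pvPairs cs i n := by
  induction cs with
  | nil => intro i n d _ _; simp [PySem.List.enumerate_nil, pvPairs]
  | cons c cs ih =>
    intro i n d hlt hnd
    rw [PySem.List.enumerate_cons, List.foldl_cons]
    by_cases hc : c = ','
    · simp only [hc, if_true]
      rw [ih (i + 1) (n + 1) d (fun x hx => lt_trans (hlt x hx) (by omega)) hnd]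
      simp [pvPairs]
    · simp only [if_neg hc]
      have hnc : d.contains i = false := pvNotContains d i hlt
      have hk : (d.insert i n).keys = d.keys ++ [i] :=
        PySem.Dict.keys_insert_of_not_contains d n hnc
      have hlt' : ∀ x ∈ (d.insert i n).keys, x < i + 1 := by
        intro x hx
        rw [hk] at hx
        rcases List.mem_append.mp hx with h | h
        · exact lt_trans (hlt x h) (by omega)
        · simp at h; omega
      have hmem : i ∉ d.keys := fun hm => absurd (hlt i hm) (lt_irrefl i)
      have hnd' : (d.insert i n).keys.Nodup := by
        rw [hk]
        rw [List.nodup_append]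
        refine ⟨hnd, List.nodup_singleton _, ?_⟩
        intro a ha b hb
        rw [List.mem_singleton] at hb
        subst hb
        exact fun he => hmem (he ▸ ha)
      rw [ih (i + 1) n (d.insert i n) hlt' hnd']
      rw [PySem.Dict.items_insert_of_not_contains d n hnc]
      simp [pvPairs, hc]

-- B's inner fold, characterized (value, items, and the preserved invariant)
lemma pvB_inner (seg : List Char) : ∀ (pos n : Int) (d : PySem.Dict Int Int),
    (∀ x ∈ d.keys, x < pos) → d.keys.Nodup →
    (pvSegLoop n seg (d, pos)).2 = pos + seg.length ∧
    (pvSegLoop n seg (d, pos)).1.items = d.items ++ pvSegPairs seg pos n ∧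
    (∀ x ∈ (pvSegLoop n seg (d, pos)).1.keys, x < pos + seg.length) ∧
    (pvSegLoop n seg (d, pos)).1.keys.Nodup := by
  induction seg with
  | nil => intro pos n d hlt hnd; simp [pvSegLoop, pvSegPairs]; exact ⟨hlt, hnd⟩
  | cons c cs ih =>
    intro pos n d hlt hnd
    have hnc : d.contains pos = false := pvNotContains d pos hlt
    have hk : (d.insert pos n).keys = d.keys ++ [pos] :=
      PySem.Dict.keys_insert_of_not_contains d n hnc
    have hlt' : ∀ x ∈ (d.insert pos n).keys, x < pos + 1 := by
      intro x hx
      rw [hk] at hx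
      rcases List.mem_append.mp hx with h | h
      · exact lt_trans (hlt x h) (by omega)
      · simp at h; omega
    have hmem : pos ∉ d.keys := fun hm => absurd (hlt pos hm) (lt_irrefl pos)
    have hnd' : (d.insert pos n).keys.Nodup := by
      rw [hk]
      rw [List.nodup_append]
      refine ⟨hnd, List.nodup_singleton _, ?_⟩
      intro a ha b hb
      rw [List.mem_singleton] at hb
      subst hb
      exact fun he => hmem (he ▸ ha)
    have step : pvSegLoop n (c :: cs) (d, pos) = pvSegLoop n cs (d.insert pos n, pos + 1) := by
      simp [pvSegLoop]
    obtain ⟨h1, h2, h3, h4⟩ := ih (pos + 1) n (d.insert pos n) hlt' hnd'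
    rw [step]
    refine ⟨?_, ?_, ?_, h4⟩
    · rw [h1]; simp; omega
    · rw [h2, PySem.Dict.items_insert_of_not_contains d n hnc]
      simp [pvSegPairs]
    · intro x hx
      have := h3 x hx
      simp at this ⊢
      omega

-- B's outer fold, characterized
lemma pvB_outer (segs : List (List Char)) : ∀ (pos n : Int) (d : PySem.Dict Int Int),
    (∀ x ∈ d.keys, x < pos) → d.keys.Nodup →
    (((PySem.List.enumerate segs n).foldl
        (fun (st : PySem.Dict Int Int × Int) p =>
          let st' := pvSegLoop p.1 p.2 st
          (st'.1, st'.2 + 1))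
        (d, pos)).1).items = d.items ++ pvSegsPairs segs pos n := by
  induction segs with
  | nil => intro pos n d _ _; simp [PySem.List.enumerate_nil, pvSegsPairs]
  | cons seg rest ih =>
    intro pos n d hlt hnd
    rw [PySem.List.enumerate_cons, List.foldl_cons]
    obtain ⟨h1, h2, h3, h4⟩ := pvB_inner seg pos n d hlt hnd
    simp only []
    rw [show (pvSegLoop n seg (d, pos)).1 = (pvSegLoop n seg (d, pos)).1 from rfl]
    have hlt2 : ∀ x ∈ (pvSegLoop n seg (d, pos)).1.keys, x < (pvSegLoop n seg (d, pos)).2 + 1 := by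
      intro x hx; have := h3 x hx; rw [h1]; omega
    rw [ih ((pvSegLoop n seg (d, pos)).2 + 1) (n + 1) (pvSegLoop n seg (d, pos)).1 hlt2 h4]
    rw [h2, h1]
    simp [pvSegsPairs]

-- splitOn.go with separator [','] is pvMySplit (plus the reversed accumulator)
lemma pvGoSpec : ∀ (fuel : Nat) (cs cur : List Char) (acc : List (List Char)),
    cs.length < fuel →
    PySem.Chars.splitOn.go [','] fuel cs cur acc = acc.reverse ++ pvMySplit cur cs := by
  intro fuel
  induction fuel with
  | zero => intro cs cur acc h; omega
  | succ f ih =>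
    intro cs cur acc h
    cases cs with
    | nil => simp [PySem.Chars.splitOn.go, pvMySplit]
    | cons c rest =>
      by_cases hc : c = ','
      · subst hc
        have : PySem.Chars.splitOn.go [','] (f + 1) (',' :: rest) cur acc =
            PySem.Chars.splitOn.go [','] f rest [] (cur.reverse :: acc) := by
          simp [PySem.Chars.splitOn.go, List.isPrefixOf]
        rw [this, ih rest [] (cur.reverse :: acc) (by simp at h ⊢; omega)]
        simp [pvMySplit]
      · have : PySem.Chars.splitOn.go [','] (f + 1) (c :: rest) cur acc =
            PySem.Chars.splitOn.go [','] f rest (c :: cur) acc := by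
          simp [PySem.Chars.splitOn.go, List.isPrefixOf, Ne.symm hc]
        rw [this, ih rest (c :: cur) acc (by simp at h ⊢; omega)]
        simp [pvMySplit, hc]

lemma pvSplitOnEq (cs : List Char) : PySem.Chars.splitOn cs [','] = pvMySplit [] cs := by
  unfold PySem.Chars.splitOn
  rw [pvGoSpec (cs.length + 1) cs [] [] (by omega)]
  simp

-- pvMySplit with a pending reversed prefix = that prefix glued onto the head of the clean split
lemma pvMySplitCur : ∀ (cs cur : List Char), ∃ h t,
    pvMySplit [] cs = h :: t ∧ pvMySplit cur cs = (cur.reverse ++ h) :: t := by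
  intro cs
  induction cs with
  | nil => intro cur; exact ⟨[], [], by simp [pvMySplit], by simp [pvMySplit]⟩
  | cons c cs ih =>
    intro cur
    by_cases hc : c = ','
    · subst hc
      exact ⟨[], pvMySplit [] cs, by simp [pvMySplit], by simp [pvMySplit]⟩
    · obtain ⟨h, t, e1, e2⟩ := ih (c :: cur)
      obtain ⟨h2, t2, e12, e22⟩ := ih [c]
      rw [e1] at e12
      injection e12 with eh et
      refine ⟨c :: h, t, ?_, ?_⟩
      · show pvMySplit [] (c :: cs) = (c :: h) :: t
        simp only [pvMySplit, if_neg hc]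
        rw [e22, ← eh, ← et]
        simp
      · show pvMySplit cur (c :: cs) = (cur.reverse ++ (c :: h)) :: t
        simp only [pvMySplit, if_neg hc]
        rw [e2]
        simp

-- the bridge: B's pairs over the split equal A's pairs over the characters
lemma pvBridge (cs : List Char) : ∀ (i n : Int),
    pvSegsPairs (pvMySplit [] cs) i n = pvPairs cs i n := by
  induction cs with
  | nil => intro i n; simp [pvMySplit, pvSegsPairs, pvSegPairs, pvPairs]
  | cons c cs ih =>
    intro i n
    by_cases hc : c = ','
    · subst hc
      show pvSegsPairs (pvMySplit [] (',' :: cs)) i n = pvPairs (',' :: cs) i n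
      simp only [pvMySplit, pvPairs]
      simp [pvSegsPairs, pvSegPairs, ih]
    · obtain ⟨h, t, e1, e2⟩ := pvMySplitCur cs [c]
      simp at e2
      have estep : pvMySplit [] (c :: cs) = (c :: h) :: t := by
        simp only [pvMySplit, if_neg hc]; exact e2
      rw [estep]
      simp only [pvSegsPairs, pvSegPairs]
      have harith : i + ((c :: h).length : Int) + 1 = (i + 1) + (h.length : Int) + 1 := by
        simp; ring
      rw [harith]
      have : (i, n) :: (pvSegPairs h (i + 1) n ++ pvSegsPairs t ((i + 1) + (h.length : Int) + 1) (n + 1))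
          = (i, n) :: pvSegsPairs (h :: t) (i + 1) n := by
        simp [pvSegsPairs]
      rw [List.cons_append, this, ← e1, ih (i + 1) n]
      simp [pvPairs, hc]

-- ===== VERDICT (by name: the statement is the Claim_ definition above) =====
theorem str_index_to_word_index_spec : Claim_equal_str_index_to_word_index := by
  intro s _
  unfold Spec_str_index_to_word_index str_index_to_word_index str_index_to_word_index_alt
  rw [pvA_fold s.toList 0 1 PySem.Dict.empty (by simp) (by simp)]
  rw [pvB_outer (PySem.Chars.splitOn s.toList [',']) 0 1 PySem.Dict.empty (by simp) (by simp)]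
  rw [pvSplitOnEq, pvBridge]
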